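-- pv_equiv track=rewrite | github.com/ausaki/data_structures_and_algorithms | leetcode/minimum-number-of-increments-on-subarrays-to-form-a-target-array/377041537.py | minNumberOperations
-- ===== SOURCE A (Python) =====
-- from typing import List
--
-- def minNumberOperations(target: List[int]) -> int:
--     target.append(0)
--     n = len(target)
--     result = 0
--     right_low = 0
--     peek = 0
--     i = 1
--     while i < n:
--         while i < n and target[i] >= target[i - 1]:
--             i += 1
--         peek = target[i - 1]
--         while i < n and target[i] <= target[i - 1]:
--             i += 1
--         right_low = target[i - 1]
--         result += peek - right_low
--     return result
-- ===== SOURCE B (Python) =====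
-- from typing import List
--
-- def minNumberOperations(target: List[int]) -> int:
--     # One flat pass: A's peak-minus-valley sums telescope to the first
--     # element plus the sum of positive steps over the 0-terminated list.
--     target.append(0)
--     result = target[0]
--     prev = target[0]
--     for x in target[1:]:
--         if x > prev:
--             result += x - prev
--         prev = x
--     return result
-- ===== Notes on version B (the rewrite author's own statement) =====
-- stated objective: simpler
-- what changed: A's nested peak/valley while-scans (summing peak minus following valley) are replaced by one flat pass that telescopes to the first element plus the sum of positive consecutive steps over the 0-terminated list.
import Mathlib
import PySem

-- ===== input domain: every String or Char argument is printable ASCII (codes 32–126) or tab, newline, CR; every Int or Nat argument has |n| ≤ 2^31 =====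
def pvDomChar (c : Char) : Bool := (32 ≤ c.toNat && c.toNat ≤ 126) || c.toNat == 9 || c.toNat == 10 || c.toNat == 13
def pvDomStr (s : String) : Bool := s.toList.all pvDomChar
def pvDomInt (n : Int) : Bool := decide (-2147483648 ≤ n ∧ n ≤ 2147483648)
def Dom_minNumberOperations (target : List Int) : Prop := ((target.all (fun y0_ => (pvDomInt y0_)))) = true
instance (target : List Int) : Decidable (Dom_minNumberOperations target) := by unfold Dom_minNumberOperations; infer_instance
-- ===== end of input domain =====

-- B replaces A's nested peak/valley while-scans by one flat pass summing positive steps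
-- (objective: simpler). Both A and B append a trailing 0 to `target` in place; the
-- equivalence proved is about the return value.

-- ===== PORT A =====
-- inner ascending while-loop: `while i < n and target[i] >= target[i-1]: i += 1`.
-- Indices are always in range in Python here, so `List.getD _ 0` is exact.
-- `fuel` only guards totality: each iteration increments i, the guard `i < n` bounds the
-- loop, and every call supplies fuel `n ≥ n - i`, so the 0-fuel branch is never the one
-- that stops the loop.
def pyAscend (t : List Int) (n : Nat) : Nat → Nat → Nat
  | 0, i => i
  | fuel+1, i => if i < n ∧ t.getD (i-1) 0 ≤ t.getD i 0 then pyAscend t n fuel (i+1) else i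

-- inner descending while-loop: `while i < n and target[i] <= target[i-1]: i += 1`
def pyDescend (t : List Int) (n : Nat) : Nat → Nat → Nat
  | 0, i => i
  | fuel+1, i => if i < n ∧ t.getD i 0 ≤ t.getD (i-1) 0 then pyDescend t n fuel (i+1) else i

-- outer while-loop of A; fuel n suffices since i strictly increases and stays ≤ n
def pyOuter (t : List Int) (n : Nat) : Nat → Nat → Int → Int
  | 0, _, result => result
  | fuel+1, i, result =>
    if i < n then
      let i1 := pyAscend t n n i
      let peek := t.getD (i1 - 1) 0
      let i2 := pyDescend t n n i1
      let right_low := t.getD (i2 - 1) 0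
      pyOuter t n fuel i2 (result + (peek - right_low))
    else result

def minNumberOperations (target : List Int) : Int :=
  let t := target ++ [0]          -- target.append(0)
  pyOuter t t.length t.length 1 0

-- ===== PORT B =====
def minNumberOperations_alt (target : List Int) : Int :=
  let t := target ++ [0]          -- target.append(0)
  let first := t.getD 0 0         -- t is nonempty: its head
  ((t.drop 1).foldl
    (fun (pr : Int × Int) x => (x, if pr.1 < x then pr.2 + (x - pr.1) else pr.2))
    (first, first)).2

-- ===== PRECONDITION & SPEC =====
def Spec_minNumberOperations (target : List Int) (out : Int) : Prop := out = minNumberOperations_alt target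
instance (target : List Int) (out : Int) : Decidable (Spec_minNumberOperations target out) := by unfold Spec_minNumberOperations; infer_instance

-- ===== CLAIM (what is proved, stated in full; the proofs are below) =====
def Claim_equal_minNumberOperations : Prop := ∀ (target : List Int), Dom_minNumberOperations target → Spec_minNumberOperations target (minNumberOperations target)

-- ===== LEMMAS AND PROOFS =====

-- sum of positive steps of a list relative to a previous value
def posSum (p : Int) : List Int → Int
  | [] => 0
  | x :: xs => max 0 (x - p) + posSum x xs

-- `S t i`: the positive-step sum of t from position i on (prev = t[i-1])
def S (t : List Int) (i : Nat) : Int := posSum (t.getD (i-1) 0) (t.drop i)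

theorem S_cons (t : List Int) (i : Nat) (h : i < t.length) :
    S t i = max 0 (t.getD i 0 - t.getD (i-1) 0) + S t (i+1) := by
  unfold S
  rw [List.drop_eq_getElem_cons h]
  simp only [posSum, Nat.add_sub_cancel, List.getD_eq_getElem t 0 h]

theorem S_nil (t : List Int) (i : Nat) (h : t.length ≤ i) : S t i = 0 := by
  unfold S
  rw [List.drop_eq_nil_of_le h]
  rfl

theorem pyAscend_ge (t : List Int) (n fuel i : Nat) : i ≤ pyAscend t n fuel i := by
  induction fuel generalizing i with
  | zero => exact le_rfl
  | succ f ih =>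
    rw [pyAscend]
    split
    · exact le_trans (by omega) (ih (i+1))
    · exact le_rfl

theorem pyAscend_le (t : List Int) (n fuel i : Nat) (h : i ≤ n) : pyAscend t n fuel i ≤ n := by
  induction fuel generalizing i with
  | zero => exact h
  | succ f ih =>
    rw [pyAscend]
    split
    · next hc => exact ih (i+1) (by omega)
    · exact h

theorem pyDescend_ge (t : List Int) (n fuel i : Nat) : i ≤ pyDescend t n fuel i := by
  induction fuel generalizing i with
  | zero => exact le_rfl
  | succ f ih =>
    rw [pyDescend]
    split
    · exact le_trans (by omega) (ih (i+1))
    · exact le_rfl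

theorem pyDescend_le (t : List Int) (n fuel i : Nat) (h : i ≤ n) : pyDescend t n fuel i ≤ n := by
  induction fuel generalizing i with
  | zero => exact h
  | succ f ih =>
    rw [pyDescend]
    split
    · next hc => exact ih (i+1) (by omega)
    · exact h

-- with sufficient fuel, the ascending scan stops only because the condition failed
theorem pyAscend_stop (t : List Int) (n fuel i : Nat) (hf : n - i ≤ fuel)
    (h : pyAscend t n fuel i < n) :
    t.getD (pyAscend t n fuel i) 0 < t.getD (pyAscend t n fuel i - 1) 0 := by
  induction fuel generalizing i with
  | zero => simp only [pyAscend] at h ⊢; omega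
  | succ f ih =>
    by_cases hc : i < n ∧ t.getD (i-1) 0 ≤ t.getD i 0
    · rw [pyAscend, if_pos hc] at h ⊢
      exact ih (i+1) (by omega) h
    · rw [pyAscend, if_neg hc] at h ⊢
      push Not at hc
      exact hc h

-- a positive-fuel descending scan whose condition holds advances at least one step
theorem pyDescend_advance (t : List Int) (n fuel i : Nat) (hf : 0 < fuel)
    (hc : i < n ∧ t.getD i 0 ≤ t.getD (i-1) 0) : i + 1 ≤ pyDescend t n fuel i := by
  cases fuel with
  | zero => omega
  | succ f =>
    rw [pyDescend, if_pos hc]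
    exact pyDescend_ge t n f (i+1)

-- the outer loop strictly advances i (needed so that fuel n is enough)
theorem pyStep_gt (t : List Int) (n i : Nat) (hi : i < n) :
    i < pyDescend t n n (pyAscend t n n i) := by
  have ha := pyAscend_ge t n n i
  by_cases h : pyAscend t n n i < n
  · have hs := pyAscend_stop t n n i (by omega) h
    have := pyDescend_advance t n n (pyAscend t n n i) (by omega) ⟨h, le_of_lt hs⟩
    omega
  · have := pyDescend_ge t n n (pyAscend t n n i)
    omega

-- the ascending scan consumes exactly the telescoped positive steps
theorem ascend_S (t : List Int) (n fuel i : Nat) (hn : n = t.length) (hf : n - i ≤ fuel) :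
    S t i = (t.getD (pyAscend t n fuel i - 1) 0 - t.getD (i-1) 0) + S t (pyAscend t n fuel i) := by
  induction fuel generalizing i with
  | zero => simp [pyAscend]
  | succ f ih =>
    by_cases hc : i < n ∧ t.getD (i-1) 0 ≤ t.getD i 0
    · rw [pyAscend, if_pos hc]
      rw [S_cons t i (by omega), ih (i+1) (by omega)]
      have : max 0 (t.getD i 0 - t.getD (i-1) 0) = t.getD i 0 - t.getD (i-1) 0 := by
        have := hc.2; omega
      simp only [Nat.add_sub_cancel]
      omega
    · rw [pyAscend, if_neg hc]
      simp
-- the descending scan consumes only non-positive steps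
theorem descend_S (t : List Int) (n fuel i : Nat) (hn : n = t.length) (hf : n - i ≤ fuel) :
    S t i = S t (pyDescend t n fuel i) := by
  induction fuel generalizing i with
  | zero => simp [pyDescend]
  | succ f ih =>
    by_cases hc : i < n ∧ t.getD i 0 ≤ t.getD (i-1) 0
    · rw [pyDescend, if_pos hc]
      rw [S_cons t i (by omega), ← ih (i+1) (by omega)]
      have : max 0 (t.getD i 0 - t.getD (i-1) 0) = 0 := by
        have := hc.2; omega
      omega
    · rw [pyDescend, if_neg hc]

-- invariant of A's outer loop (t ends in 0, so the base case closes)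
theorem pyOuter_inv (t : List Int) (n fuel i : Nat) (r : Int)
    (hn : n = t.length) (hf : n - i ≤ fuel) (hi : i ≤ n) (hlast : t.getD (n-1) 0 = 0) :
    pyOuter t n fuel i r = r + S t i + t.getD (i-1) 0 := by
  induction fuel generalizing i r with
  | zero =>
    have hin : i = n := by omega
    rw [hin, pyOuter, S_nil t n (by omega)]
    omega
  | succ f ih =>
    rw [pyOuter]
    by_cases h : i < n
    · rw [if_pos h]
      have hgt := pyStep_gt t n i h
      have hle := pyDescend_le t n n (pyAscend t n n i) (pyAscend_le t n n i (le_of_lt h))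
      rw [ih (pyDescend t n n (pyAscend t n n i)) _ (by omega) hle]
      have ha := ascend_S t n n i hn (by omega)
      have hd := descend_S t n n (pyAscend t n n i) hn (by omega)
      omega
    · rw [if_neg h]
      have hin : i = n := by omega
      rw [hin, S_nil t n (by omega)]
      omega

-- B's fold accumulates posSum
theorem foldl_posSum (xs : List Int) (p r : Int) :
    (xs.foldl (fun (pr : Int × Int) x => (x, if pr.1 < x then pr.2 + (x - pr.1) else pr.2)) (p, r)).2
      = r + posSum p xs := by
  induction xs generalizing p r with
  | nil => simp [posSum]
  | cons x xs ih =>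
    simp only [List.foldl_cons, posSum, ih]
    by_cases h : p < x
    · simp [h]; omega
    · simp [h]; omega

theorem last_getD (target : List Int) :
    (target ++ [0]).getD ((target ++ [0]).length - 1) 0 = 0 := by
  simp [List.getD_eq_getElem?_getD]

-- ===== VERDICT (by name: the statement is the Claim_ definition above) =====
theorem minNumberOperations_spec : Claim_equal_minNumberOperations := by
  intro target _
  unfold Spec_minNumberOperations minNumberOperations minNumberOperations_alt
  simp only
  set t := target ++ [0] with ht
  have hlen : 1 ≤ t.length := by simp [ht]
  rw [pyOuter_inv t t.length t.length 1 0 rfl (by omega) hlen (last_getD target)]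
  rw [foldl_posSum]
  have h1 : S t 1 = posSum (t.getD 0 0) (t.drop 1) := rfl
  have h0 : t.getD (1-1) 0 = t.getD 0 0 := rfl
  omega
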